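-- pv_equiv track=rewrite | github.com/hankyeolyu/vilab_hw | ex25.py | solution
-- ===== SOURCE A (Python) =====
-- def solution(s):
--     answer = ''
--     small_ans = []
--     big_ans = []
--     for i in range(0, len(s)):
--         if s[i].islower() == True:
--             small_ans.append(ord(s[i]))
--         else:
--             big_ans.append(ord(s[i]))
--     small_ans.sort(reverse=True)
--     big_ans.sort(reverse=True)
--     for i in range(0, len(small_ans)):
--         ch1 = chr(small_ans[i])
--         answer += ch1
--     for i in range(0, len(big_ans)):
--         ch2 = chr(big_ans[i])
--         answer += ch2
--     return answer
-- ===== SOURCE B (Python) =====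
-- def solution(s):
--     # counting sort over the 128 ASCII codes instead of comparison sorting
--     counts = [0] * 128
--     for ch in s:
--         counts[ord(ch)] += 1
--     parts = []
--     for c in range(122, 96, -1):
--         parts.append(chr(c) * counts[c])
--     for c in range(127, -1, -1):
--         if c < 97 or c > 122:
--             parts.append(chr(c) * counts[c])
--     return ''.join(parts)
-- ===== Notes on version B (the rewrite author's own statement) =====
-- stated objective: faster
-- what changed: Replaces the two comparison sorts (collect ords, sort each list descending, rebuild char by char) with a single counting pass over the 128 ASCII codes and a direct descending sweep of the code range, emitting each character's repetitions at once.
import Mathlib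
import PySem

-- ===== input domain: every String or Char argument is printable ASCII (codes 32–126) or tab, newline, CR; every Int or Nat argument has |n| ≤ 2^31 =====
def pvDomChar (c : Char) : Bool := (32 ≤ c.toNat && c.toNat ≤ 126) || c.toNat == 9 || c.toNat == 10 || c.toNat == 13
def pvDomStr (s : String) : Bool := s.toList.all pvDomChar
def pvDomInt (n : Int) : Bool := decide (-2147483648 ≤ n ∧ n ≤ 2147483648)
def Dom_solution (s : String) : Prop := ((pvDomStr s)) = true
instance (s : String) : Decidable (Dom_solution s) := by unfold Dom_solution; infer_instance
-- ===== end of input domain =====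

-- B replaces A's two comparison sorts by a counting pass over the 128 ASCII codes and a
-- direct descending sweep of the code range (objective: faster).

-- ===== PORT A =====
-- s[i].islower(): exact on the ASCII domain (only 'a'..'z' are lowercase there)
def pyIslower (c : Char) : Bool := 97 ≤ c.toNat && c.toNat ≤ 122

def solution (s : String) : String :=
  -- first loop: partition ord values into small_ans / big_ans, in order
  let p := s.toList.foldl
    (fun (ab : List Int × List Int) c =>
      if pyIslower c then (ab.1 ++ [(c.toNat : Int)], ab.2) else (ab.1, ab.2 ++ [(c.toNat : Int)]))
    ([], [])
  -- .sort(reverse=True)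
  let small := PySem.List.sorted p.1 (fun x => x) true
  let big := PySem.List.sorted p.2 (fun x => x) true
  -- answer += chr(...), char by char
  let a1 := small.foldl (fun acc n => acc ++ [Char.ofNat n.toNat]) ([] : List Char)
  let a2 := big.foldl (fun acc n => acc ++ [Char.ofNat n.toNat]) a1
  String.mk a2

-- ===== PORT B =====
def solution_alt (s : String) : String :=
  -- counts[ord(ch)] += 1  (index in range on the ASCII domain, so getD/set are exact)
  let counts := s.toList.foldl
    (fun (l : List Int) c => l.set c.toNat (l.getD c.toNat 0 + 1))
    (List.replicate 128 (0 : Int))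
  -- for c in range(122, 96, -1): parts.append(chr(c) * counts[c])
  let p1 := (PySem.List.pyRange 122 96 (-1)).foldl
    (fun acc n => acc ++ List.replicate (counts.getD n.toNat 0).toNat (Char.ofNat n.toNat))
    ([] : List Char)
  -- for c in range(127, -1, -1): if c < 97 or c > 122: parts.append(chr(c) * counts[c])
  let p2 := (PySem.List.pyRange 127 (-1) (-1)).foldl
    (fun acc n =>
      if n < 97 || 122 < n then
        acc ++ List.replicate (counts.getD n.toNat 0).toNat (Char.ofNat n.toNat)
      else acc)
    p1
  -- ''.join(parts)
  String.mk p2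

-- ===== PRECONDITION & SPEC =====
def Spec_solution (s : String) (out : String) : Prop := out = solution_alt s
instance (s : String) (out : String) : Decidable (Spec_solution s out) := by unfold Spec_solution; infer_instance

-- ===== CLAIM (what is proved, stated in full; the proofs are below) =====
def Claim_equal_solution : Prop := ∀ (s : String), Dom_solution s → Spec_solution s (solution s)

-- ===== LEMMAS AND PROOFS =====

-- the two descending code lists B's ranges sweep
def Llow : List Int := [122, 121, 120, 119, 118, 117, 116, 115, 114, 113, 112, 111, 110, 109, 108, 107, 106, 105, 104, 103, 102, 101, 100, 99, 98, 97]
def Lhi : List Int := [127, 126, 125, 124, 123, 96, 95, 94, 93, 92, 91, 90, 89, 88, 87, 86, 85, 84, 83, 82, 81, 80, 79, 78, 77, 76, 75, 74, 73, 72, 71, 70, 69, 68, 67, 66, 65, 64, 63, 62, 61, 60, 59, 58, 57, 56, 55, 54, 53, 52, 51, 50, 49, 48, 47, 46, 45, 44, 43, 42, 41, 40, 39, 38, 37, 36, 35, 34, 33, 32, 31, 30, 29, 28, 27, 26, 25, 24, 23, 22, 21, 20, 19, 18, 17, 16, 15, 14, 13, 12, 11, 10, 9, 8, 7, 6, 5,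 4, 3, 2, 1, 0]

theorem Llow_eval : PySem.List.pyRange 122 96 (-1) = Llow := by decide
theorem Lhi_eval : (PySem.List.pyRange 127 (-1) (-1)).filter (fun n => n < 97 || 122 < n) = Lhi := by decide

-- A's partition loop produces the two filtered ord lists
theorem partition_loop (cs : List Char) (a b : List Int) :
    cs.foldl
      (fun (ab : List Int × List Int) c =>
        if pyIslower c then (ab.1 ++ [(c.toNat : Int)], ab.2) else (ab.1, ab.2 ++ [(c.toNat : Int)]))
      (a, b)
    = (a ++ (cs.filter pyIslower).map (fun c => (c.toNat : Int)),
       b ++ (cs.filter (fun c => !pyIslower c)).map (fun c => (c.toNat : Int))) := by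
  induction cs generalizing a b with
  | nil => simp
  | cons c cs ih =>
    by_cases h : pyIslower c = true <;> simp [h, ih]

-- a descending sort is determined by a permutation that is pairwise ≥
theorem sorted_rev_eq_of_perm_of_pairwise_ge (xs ys : List Int)
    (hp : ys.Perm xs) (hs : ys.Pairwise (fun a b => b ≤ a)) :
    PySem.List.sorted xs (fun x => x) true = ys := by
  have hperm : (PySem.List.sorted xs (fun x => x) true).Perm ys :=
    (PySem.List.sorted_perm xs (fun x => x) true).trans hp.symm
  have h1 : (PySem.List.sorted xs (fun x => x) true).Pairwise (fun a b => b ≤ a) :=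
    PySem.List.sorted_pairwise_rev xs (fun x => x)
  exact List.Perm.eq_of_pairwise (fun a b _ _ h1 h2 => le_antisymm h2 h1) h1 hs hperm

-- the block list is a permutation of ys when the code list covers ys
theorem blocks_perm (L ys : List Int) (hL : L.Pairwise (fun a b => b < a))
    (hcov : ∀ y ∈ ys, y ∈ L) :
    (L.flatMap (fun n => List.replicate (ys.count n) n)).Perm ys := by
  induction L generalizing ys with
  | nil =>
    have : ys = [] := by
      cases ys with
      | nil => rfl
      | cons y t => exact absurd (hcov y (by simp)) (by simp)
    simp [this]
  | cons n L ih =>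
    have hrep : ys.filter (fun y => y == n) = List.replicate (ys.count n) n :=
      List.filter_beq n
    have hcov' : ∀ y ∈ ys.filter (fun y => !(y == n)), y ∈ L := by
      intro y hy
      simp only [List.mem_filter, Bool.not_eq_eq_eq_not, Bool.not_true,
        beq_eq_false_iff_ne] at hy
      rcases List.mem_cons.mp (hcov y hy.1) with h | h
      · exact absurd h hy.2
      · exact h
    have hcnt : ∀ m ∈ L, (ys.filter (fun y => !(y == n))).count m = ys.count m := by
      intro m hm
      have hmn : m ≠ n := by
        have := List.rel_of_pairwise_cons hL hm
        omega
      simp only [List.count_eq_countP, List.countP_filter]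
      apply List.countP_congr
      intro y _
      constructor
      · intro h
        simpa using (Bool.and_elim_left h)
      · intro h
        have : y = m := by simpa using h
        subst this
        simp [hmn]
    have hmapeq : L.flatMap (fun m => List.replicate (ys.count m) m)
        = L.flatMap (fun m => List.replicate ((ys.filter (fun y => !(y == n))).count m) m) := by
      unfold List.flatMap
      congr 1
      apply List.map_congr_left
      intro m hm
      rw [hcnt m hm]
    have ihh := ih (ys.filter (fun y => !(y == n)))
      (hL.sublist (List.sublist_cons_self n L)) hcov'
    rw [List.flatMap_cons, hmapeq, ← hrep]
    exact (ihh.append_left _).trans (List.filter_append_perm _ ys)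

-- the block list is pairwise descending (≥)
theorem blocks_pairwise (L ys : List Int) (hL : L.Pairwise (fun a b => b < a)) :
    (L.flatMap (fun n => List.replicate (ys.count n) n)).Pairwise (fun a b => b ≤ a) := by
  induction L with
  | nil => simp
  | cons n L ih =>
    rw [List.flatMap_cons]
    apply List.pairwise_append.mpr
    refine ⟨?_, ih hL.tail, ?_⟩
    · exact List.pairwise_replicate.mpr (Or.inr le_rfl)
    · intro x hx y hy
      have hxn : x = n := List.eq_of_mem_replicate hx
      rcases List.mem_flatMap.mp hy with ⟨m, hm, hym⟩
      have hym' : y = m := List.eq_of_mem_replicate hym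
      have : m < n := List.rel_of_pairwise_cons hL hm
      omega

-- block decomposition of a descending sort along a strictly decreasing covering code list
theorem sorted_rev_eq_blocks (L ys : List Int)
    (hL : L.Pairwise (fun a b => b < a)) (hcov : ∀ y ∈ ys, y ∈ L) :
    PySem.List.sorted ys (fun x => x) true
      = L.flatMap (fun n => List.replicate (ys.count n) n) := by
  exact sorted_rev_eq_of_perm_of_pairwise_ge ys _ (blocks_perm L ys hL hcov)
    (blocks_pairwise L ys hL)

-- membership in the two literal code lists
theorem mem_Llow (y : Int) (h1 : 97 ≤ y) (h2 : y ≤ 122) : y ∈ Llow := by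
  simp only [Llow, List.mem_cons, List.not_mem_nil, or_false]
  omega

theorem mem_Lhi (y : Int) (h0 : 0 ≤ y) (h127 : y ≤ 127) (hout : y < 97 ∨ 122 < y) :
    y ∈ Lhi := by
  simp only [Lhi, List.mem_cons, List.not_mem_nil, or_false]
  omega

theorem Llow_desc : Llow.Pairwise (fun a b => b < a) := by decide
theorem Lhi_desc : Lhi.Pairwise (fun a b => b < a) := by decide

-- flatMap respects pointwise equality on members
theorem flatMap_congr_mem {A B : Type} (L : List A) (f g : A → List B)
    (h : ∀ x ∈ L, f x = g x) : L.flatMap f = L.flatMap g := by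
  unfold List.flatMap
  congr 1
  exact List.map_congr_left h

-- B's first counting loop, characterised
theorem counts_loop (cs : List Char) (l : List Int)
    (hcs : ∀ c ∈ cs, c.toNat < l.length) (k : Nat) (hk : k < l.length) :
    ((cs.foldl (fun (l : List Int) c => l.set c.toNat (l.getD c.toNat 0 + 1)) l).getD k 0)
      = l.getD k 0 + (cs.countP (fun c => c.toNat == k) : Int) := by
  induction cs generalizing l with
  | nil => simp
  | cons c cs ih =>
    have hc : c.toNat < l.length := hcs c (by simp)
    have hlen : (l.set c.toNat (l.getD c.toNat 0 + 1)).length = l.length := by simp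
    rw [List.foldl_cons, ih _ (by rw [hlen]; exact fun x hx => hcs x (by simp [hx])) (by omega)]
    have hset : (l.set c.toNat (l.getD c.toNat 0 + 1)).getD k 0
        = if c.toNat = k then l.getD c.toNat 0 + 1 else l.getD k 0 := by
      simp only [List.getD_eq_getElem?_getD, List.getElem?_set, hc]
      split <;> simp_all
    rw [hset, List.countP_cons]
    by_cases h : c.toNat = k <;> simp [h] <;> omega

theorem getD_replicate_zero (k : Nat) : (List.replicate 128 (0:Int)).getD k 0 = 0 := by
  simp only [List.getD_eq_getElem?_getD, List.getElem?_replicate]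
  split <;> simp

-- B's second/third loops as filtered flatMaps
theorem foldl_append_ite {A B : Type} (p : A → Bool) (g : A → List B) (L : List A)
    (acc : List B) :
    L.foldl (fun acc n => if p n then acc ++ g n else acc) acc
      = acc ++ (L.filter p).flatMap g := by
  induction L generalizing acc with
  | nil => simp
  | cons n L ih =>
    by_cases h : p n <;> simp [h, ih]

-- the count of code n among the lower (resp. non-lower) ord values is the plain char count
theorem count_low (cs : List Char) (n : Int) (h1 : 97 ≤ n) (h2 : n ≤ 122) :
    (((cs.filter pyIslower).map (fun c => (c.toNat : Int))).count n)
      = cs.countP (fun c => c.toNat == n.toNat) := by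
  rw [List.count_eq_countP, List.countP_map, List.countP_filter]
  apply List.countP_congr
  intro c _
  simp only [Function.comp, Bool.and_eq_true, beq_iff_eq, pyIslower, decide_eq_true_eq]
  omega

theorem count_big (cs : List Char) (n : Int) (h0 : 0 ≤ n)
    (hout : n < 97 ∨ 122 < n) :
    (((cs.filter (fun c => !pyIslower c)).map (fun c => (c.toNat : Int))).count n)
      = cs.countP (fun c => c.toNat == n.toNat) := by
  rw [List.count_eq_countP, List.countP_map, List.countP_filter]
  apply List.countP_congr
  intro c _
  simp only [Function.comp, Bool.and_eq_true, beq_iff_eq, pyIslower,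
    Bool.not_eq_eq_eq_not, Bool.not_true, Bool.and_eq_false_iff,
    decide_eq_false_iff_not]
  omega

theorem Llow_bound : ∀ n ∈ Llow, 97 ≤ n ∧ n ≤ 122 := by decide
theorem Lhi_bound : ∀ n ∈ Lhi, 0 ≤ n ∧ n ≤ 127 ∧ (n < 97 ∨ 122 < n) := by decide

-- ===== VERDICT =====
theorem solution_spec : Claim_equal_solution := by
  intro s hdom
  unfold Spec_solution solution solution_alt
  have hcs : ∀ c ∈ s.toList, c.toNat < 128 := by
    intro c hc
    have := List.all_eq_true.mp hdom c hc
    simp only [pvDomChar, Bool.or_eq_true, Bool.and_eq_true, decide_eq_true_eq, beq_iff_eq] at this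
    omega
  set cs := s.toList with hcsdef
  -- A side: partition, sort, rebuild
  rw [partition_loop cs [] []]
  simp only [List.nil_append]
  rw [PySem.List.foldl_append_singleton_eq_map, PySem.List.foldl_append_singleton_eq_map]
  set lows := (cs.filter pyIslower).map (fun c => (c.toNat : Int)) with hlows
  set bigs := (cs.filter (fun c => !pyIslower c)).map (fun c => (c.toNat : Int)) with hbigs
  have hlowsort : PySem.List.sorted lows (fun x => x) true
      = Llow.flatMap (fun n => List.replicate (lows.count n) n) := by
    apply sorted_rev_eq_blocks _ _ Llow_desc
    intro y hy
    rw [hlows] at hy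
    rcases List.mem_map.mp hy with ⟨c, hcmem, rfl⟩
    have := (List.mem_filter.mp hcmem).2
    simp only [pyIslower, Bool.and_eq_true, decide_eq_true_eq] at this
    exact mem_Llow _ (by omega) (by omega)
  have hbigsort : PySem.List.sorted bigs (fun x => x) true
      = Lhi.flatMap (fun n => List.replicate (bigs.count n) n) := by
    apply sorted_rev_eq_blocks _ _ Lhi_desc
    intro y hy
    rw [hbigs] at hy
    rcases List.mem_map.mp hy with ⟨c, hcmem, rfl⟩
    have h1 := (List.mem_filter.mp hcmem).2
    have h2 := hcs c (List.mem_filter.mp hcmem).1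
    simp only [pyIslower, Bool.not_eq_eq_eq_not, Bool.not_true, Bool.and_eq_false_iff,
      decide_eq_false_iff_not] at h1
    exact mem_Lhi _ (by omega) (by omega) (by omega)
  rw [hlowsort, hbigsort]
  -- B side: counting pass, descending sweeps
  rw [Llow_eval, PySem.List.foldl_append_eq_flatMap, foldl_append_ite, Lhi_eval]
  simp only [List.nil_append]
  set counts := cs.foldl (fun (l : List Int) c => l.set c.toNat (l.getD c.toNat 0 + 1))
    (List.replicate 128 (0 : Int)) with hcounts
  have hcount : ∀ k : Nat, k < 128 → counts.getD k 0 = (cs.countP (fun c => c.toNat == k) : Int) := by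
    intro k hk
    rw [hcounts, counts_loop cs _ (by simpa using hcs) k (by simpa using hk),
      getD_replicate_zero]
    ring
  -- both sides are now block concatenations over Llow / Lhi; match them blockwise
  congr 1
  congr 1
  · rw [List.map_flatMap]
    apply flatMap_congr_mem
    intro n hn
    obtain ⟨h1, h2⟩ := Llow_bound n hn
    rw [List.map_replicate, count_low cs n h1 h2, hcount n.toNat (by omega)]
    have : ((cs.countP (fun c => c.toNat == n.toNat) : Int)).toNat
        = cs.countP (fun c => c.toNat == n.toNat) := by omega
    rw [this]
  · rw [List.map_flatMap]
    apply flatMap_congr_mem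
    intro n hn
    obtain ⟨h0, h127, hout⟩ := Lhi_bound n hn
    rw [List.map_replicate, count_big cs n h0 hout, hcount n.toNat (by omega)]
    have : ((cs.countP (fun c => c.toNat == n.toNat) : Int)).toNat
        = cs.countP (fun c => c.toNat == n.toNat) := by omega
    rw [this]
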